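-- pv_equiv track=rewrite | github.com/Dontpanice/Emotra_project | my_functions_emotra.py | find_index_sound
-- ===== SOURCE A (Python) =====
-- def find_index_sound(lista):
--     index_list = []
--     for idx,element in enumerate(lista):
--         if element == 1:
--             index_list.append(idx)
--         else:
--             continue
--
--     index_list_refined = index_list[0::196]
--     return index_list_refined
-- ===== SOURCE B (Python) =====
-- def find_index_sound(lista):
--     res = []
--     counter = 0
--     for idx, element in enumerate(lista):
--         if element == 1:
--             if counter % 196 == 0:
--                 res.append(idx)
--             counter += 1
--     return res
-- ===== Notes on version B (the rewrite author's own statement) =====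
-- stated objective: simpler
-- what changed: Single fused pass with a match-counter that appends every 196th match directly, instead of building the full index list and slicing it with [0::196].
import Mathlib
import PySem

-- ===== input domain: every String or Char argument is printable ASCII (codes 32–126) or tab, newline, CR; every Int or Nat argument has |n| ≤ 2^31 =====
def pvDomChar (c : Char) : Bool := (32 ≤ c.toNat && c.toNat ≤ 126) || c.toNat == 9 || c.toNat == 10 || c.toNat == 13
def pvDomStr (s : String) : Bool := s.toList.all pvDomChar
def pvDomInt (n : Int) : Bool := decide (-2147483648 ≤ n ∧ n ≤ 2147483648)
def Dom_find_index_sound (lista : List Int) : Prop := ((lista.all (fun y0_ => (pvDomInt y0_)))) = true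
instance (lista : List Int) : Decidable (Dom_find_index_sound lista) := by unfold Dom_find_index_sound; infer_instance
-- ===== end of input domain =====

-- B fuses A's two passes (collect all match indices, then slice [0::196]) into one
-- pass with a match-counter that appends only every 196th match; return value only.


-- ===== PORT A =====
def find_index_sound (lista : List Int) : List Int :=
  let index_list := (PySem.List.enumerate lista).foldl
    (fun acc p => if p.2 == 1 then acc ++ [p.1] else acc) []
  -- index_list[0::196]: step is the literal 196 ≠ 0, so slice? is always `some`
  (PySem.List.slice? index_list (some 0) none 196).getD []

-- ===== PORT B =====
def find_index_sound_alt (lista : List Int) : List Int :=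
  ((PySem.List.enumerate lista).foldl
    (fun st p => if p.2 == 1 then
        (st.1 + 1, if st.1 % 196 == 0 then st.2 ++ [p.1] else st.2)
      else st) ((0 : Nat), ([] : List Int))).2

-- ===== PRECONDITION & SPEC =====
def Spec_find_index_sound (lista : List Int) (out : List Int) : Prop := out = find_index_sound_alt lista
instance (lista : List Int) (out : List Int) : Decidable (Spec_find_index_sound lista out) := by unfold Spec_find_index_sound; infer_instance

-- ===== CLAIM (what is proved, stated in full; the proofs are below) =====
def Claim_equal_find_index_sound : Prop := ∀ (lista : List Int), Dom_find_index_sound lista → Spec_find_index_sound lista (find_index_sound lista)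

-- ===== LEMMAS AND PROOFS =====

/-- the indices (first components) of the pairs whose second component is 1 -/
def onesL : List (Int × Int) → List Int
  | [] => []
  | p :: ps => if p.2 = 1 then p.1 :: onesL ps else onesL ps

/-- every 196th element, starting with the first -/
def strideA : List Int → List Int
  | [] => []
  | x :: xs => x :: strideA (xs.drop 195)
  termination_by l => l.length
  decreasing_by simp

/-- keep the elements whose position, counted from `c`, is a multiple of 196 -/
def strideFrom : Nat → List Int → List Int
  | _, [] => []
  | c, x :: xs => if c % 196 = 0 then x :: strideFrom (c + 1) xs else strideFrom (c + 1) xs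

theorem A_fold (ps : List (Int × Int)) (acc : List Int) :
    ps.foldl (fun acc p => if p.2 == 1 then acc ++ [p.1] else acc) acc = acc ++ onesL ps := by
  induction ps generalizing acc with
  | nil => simp [onesL]
  | cons p ps ih =>
    rw [List.foldl_cons, ih]
    by_cases h : p.2 = 1 <;> simp [onesL, h]

theorem B_fold (ps : List (Int × Int)) (c : Nat) (acc : List Int) :
    ps.foldl (fun st p => if p.2 == 1 then
        (st.1 + 1, if st.1 % 196 == 0 then st.2 ++ [p.1] else st.2)
      else st) (c, acc) = (c + (onesL ps).length, acc ++ strideFrom c (onesL ps)) := by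
  induction ps generalizing c acc with
  | nil => simp [onesL, strideFrom]
  | cons p ps ih =>
    rw [List.foldl_cons]
    by_cases h : p.2 = 1
    · rw [if_pos (show (p.2 == 1) = true by simp [h]), ih]
      by_cases hc : c % 196 = 0 <;>
        simp [onesL, strideFrom, h, hc, List.append_assoc] <;> omega
    · rw [if_neg (show ¬ (p.2 == 1) = true by simp [h]), ih]
      simp [onesL, h]

theorem strideFrom_add (l : List Int) (c : Nat) :
    strideFrom (c + 196) l = strideFrom c l := by
  induction l generalizing c with
  | nil => rfl
  | cons x xs ih =>
    simp only [strideFrom, Nat.add_mod_right]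
    have : c + 196 + 1 = (c + 1) + 196 := by omega
    rw [this, ih]

theorem strideA_nil : strideA [] = [] := by rw [strideA]

theorem strideA_cons (x : Int) (xs : List Int) :
    strideA (x :: xs) = x :: strideA (xs.drop 195) := by rw [strideA]

theorem strideFrom_eq_strideA (l : List Int) (c : Nat) (hc : c < 196) :
    strideFrom c l = strideA (l.drop ((196 - c) % 196)) := by
  induction l generalizing c with
  | nil => simp [strideFrom, strideA_nil]
  | cons x xs ih =>
    by_cases h0 : c = 0
    · subst h0
      have h195 : strideFrom 1 xs = strideA (xs.drop 195) := by
        simpa using ih 1 (by omega)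
      simp [strideFrom, strideA_cons, h195]
    · have hm : c % 196 ≠ 0 := by omega
      have hd : (196 - c) % 196 = (195 - c) + 1 := by omega
      simp only [strideFrom, if_neg hm, hd, List.drop_succ_cons]
      by_cases h195 : c = 195
      · subst h195
        have h196 : (195 : Nat) + 1 = 0 + 196 := by omega
        rw [h196, strideFrom_add]
        simpa using ih 0 (by omega)
      · have hd2 : (196 - (c + 1)) % 196 = 195 - c := by omega
        rw [ih (c + 1) (by omega), hd2]

theorem strideFrom_zero (l : List Int) : strideFrom 0 l = strideA l := by
  have := strideFrom_eq_strideA l 0 (by omega); simpa using this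

theorem filterMap_stride (l : List Int) :
    List.filterMap (fun k => l[196 * k]?) (List.range ((l.length + 195) / 196)) = strideA l := by
  induction l using strideA.induct with
  | case1 => simp [strideA_nil]
  | case2 x xs ih =>
    have hcnt : (xs.length + 1 + 195) / 196 = xs.length / 196 + 1 := by omega
    have hcnt2 : ((xs.drop 195).length + 195) / 196 = xs.length / 196 := by
      simp only [List.length_drop]; omega
    simp only [List.length_cons]
    rw [hcnt, List.range_succ_eq_map, List.filterMap_cons, List.filterMap_map]
    have h0 : (x :: xs)[196 * 0]? = some x := by simp
    rw [h0]
    have hstep : ∀ k : Nat, (x :: xs)[196 * (k + 1)]? = (xs.drop 195)[196 * k]? := by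
      intro k
      rw [List.getElem?_drop]
      have : 196 * (k + 1) = (195 + 196 * k) + 1 := by ring
      rw [this, List.getElem?_cons_succ]
    simp only [Function.comp_def, Nat.succ_eq_add_one, hstep]
    rw [← hcnt2, ih, strideA_cons]

theorem slice_stride (l : List Int) :
    (PySem.List.slice? l (some 0) none 196).getD [] = strideA l := by
  simp only [PySem.List.slice?, PySem.List.sliceIndices]
  norm_num
  have hc : (if 0 < l.length then (((l.length : Int) + 196 - 1) / 196).toNat else 0)
      = (l.length + 195) / 196 := by split <;> omega
  have hg : ∀ k : Nat, ((196 : Int) * (k : Int)).toNat = 196 * k := by intro k; omega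
  simp only [hc, hg]
  exact filterMap_stride l

-- ===== VERDICT (by name: the statement is the Claim_ definition above) =====
theorem find_index_sound_spec : Claim_equal_find_index_sound := by
  intro lista _
  unfold Spec_find_index_sound find_index_sound find_index_sound_alt
  rw [A_fold, B_fold, List.nil_append, List.nil_append, strideFrom_zero, slice_stride]
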